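-- pv_equiv track=rewrite | github.com/fmwalle/Data_Stracture_excersise | industry/practicalProblem/skilMatch.py | canMatchFellows
-- ===== SOURCE A (Python) =====
-- def canMatchFellows(skillMap: dict) -> bool:
--     if len(skillMap)==0:
--         return True
--     if len(skillMap)%2!=0:
--         return False
--     skilSet=set()
--
--     for skill in skillMap.values():
--         if skill in skilSet:
--             skilSet.discard(skill)
--         else:
--             skilSet.add(skill)
--     return len(skilSet)==0
-- ===== SOURCE B (Python) =====
-- from collections import Counter
--
-- def canMatchFellows(skillMap: dict) -> bool:
--     counts = Counter(skillMap.values())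
--     return all(c % 2 == 0 for c in counts.values())
-- ===== Notes on version B (the rewrite author's own statement) =====
-- stated objective: simpler
-- what changed: Replaces the online toggled presence-set pass (plus two length guards) with building a full Counter of the values once and checking that every count is even; the odd-length guard is subsumed because an odd total forces some odd count.
import Mathlib
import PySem

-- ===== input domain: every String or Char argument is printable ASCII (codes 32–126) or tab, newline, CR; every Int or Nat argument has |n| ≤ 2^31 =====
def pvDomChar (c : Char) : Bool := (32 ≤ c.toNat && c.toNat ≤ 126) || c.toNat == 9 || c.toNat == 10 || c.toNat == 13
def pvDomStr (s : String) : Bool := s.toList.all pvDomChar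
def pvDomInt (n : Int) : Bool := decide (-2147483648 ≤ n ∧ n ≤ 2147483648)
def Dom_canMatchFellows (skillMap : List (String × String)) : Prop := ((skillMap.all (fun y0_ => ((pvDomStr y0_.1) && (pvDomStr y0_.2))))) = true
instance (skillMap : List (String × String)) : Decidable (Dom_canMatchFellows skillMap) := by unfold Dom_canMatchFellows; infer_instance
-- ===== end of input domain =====

-- B builds a full frequency map of the values and checks every count is even,
-- replacing A's length guards plus toggled presence-set pass (objective: simpler).


-- ===== PORT A =====
-- the loop body: 'if skill in skilSet: skilSet.discard(skill) else: skilSet.add(skill)'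
def toggleStep (s : PySem.Set String) (skill : String) : PySem.Set String :=
  if PySem.Set.contains s skill then PySem.Set.discard s skill else PySem.Set.add s skill

def canMatchFellows (skillMap : List (String × String)) : Bool :=
  let d := PySem.Dict.ofList skillMap
  if d.size == 0 then true
  else if d.size % 2 != 0 then false
  else
    let skilSet := d.values.foldl toggleStep PySem.Set.empty
    PySem.Set.len skilSet == 0

-- ===== PORT B =====
def canMatchFellows_alt (skillMap : List (String × String)) : Bool :=
  let counts := PySem.Dict.counter (PySem.Dict.ofList skillMap).values
  counts.values.all (fun c => c % 2 == 0)

-- ===== PRECONDITION & SPEC =====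
def Spec_canMatchFellows (skillMap : List (String × String)) (out : Bool) : Prop := out = canMatchFellows_alt skillMap
instance (skillMap : List (String × String)) (out : Bool) : Decidable (Spec_canMatchFellows skillMap out) := by unfold Spec_canMatchFellows; infer_instance

-- ===== CLAIM (what is proved, stated in full; the proofs are below) =====
def Claim_equal_canMatchFellows : Prop := ∀ (skillMap : List (String × String)), Dom_canMatchFellows skillMap → Spec_canMatchFellows skillMap (canMatchFellows skillMap)

-- ===== LEMMAS AND PROOFS =====

lemma mem_toggleStep (s : PySem.Set String) (a x : String) :
    x ∈ toggleStep s a ↔ ((x ∈ s ∧ x ≠ a) ∨ (x = a ∧ a ∉ s)) := by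
  unfold toggleStep
  by_cases hc : a ∈ s
  · rw [if_pos (by simpa [PySem.Set.contains] using hc)]
    simp only [PySem.Set.discard, List.mem_filter, Bool.not_eq_eq_eq_not, Bool.not_true,
      beq_eq_false_iff_ne, ne_eq]
    tauto
  · rw [if_neg (by simpa [PySem.Set.contains] using hc)]
    have : PySem.Set.add s a = s ++ [a] := by
      simp only [PySem.Set.add, PySem.Set.contains]
      rw [if_neg (by simpa using hc)]
    rw [this]
    simp only [List.mem_append, List.mem_singleton]
    constructor
    · rintro (hs | rfl)
      · exact Or.inl ⟨hs, fun hxa => hc (hxa ▸ hs)⟩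
      · exact Or.inr ⟨rfl, hc⟩
    · rintro (⟨hs, _⟩ | ⟨rfl, _⟩)
      · exact Or.inl hs
      · exact Or.inr rfl

lemma nodup_toggleStep (s : PySem.Set String) (a : String) (hnd : s.Nodup) :
    (toggleStep s a).Nodup := by
  unfold toggleStep
  by_cases hc : a ∈ s
  · rw [if_pos (by simpa [PySem.Set.contains] using hc)]
    exact hnd.filter _
  · rw [if_neg (by simpa [PySem.Set.contains] using hc)]
    have : PySem.Set.add s a = s ++ [a] := by
      simp only [PySem.Set.add, PySem.Set.contains]
      rw [if_neg (by simpa using hc)]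
    rw [this, List.nodup_append]
    refine ⟨hnd, List.nodup_singleton a, ?_⟩
    intro y hy z hz
    have hz2 : z = a := by simpa using hz
    intro he
    exact hc (hz2 ▸ he ▸ hy)

-- membership in the toggled set: x survives the fold iff its parity of occurrences
-- in the remaining list matches its presence in the accumulator
lemma toggle_inv (vs : List String) (s : PySem.Set String) (hnd : s.Nodup) :
    (vs.foldl toggleStep s).Nodup ∧
    ∀ x, x ∈ vs.foldl toggleStep s ↔ ((x ∈ s) ↔ vs.count x % 2 = 0) := by
  induction vs generalizing s with
  | nil =>
    refine ⟨hnd, fun x => ?_⟩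
    simp
  | cons a t ih =>
    obtain ⟨h1, h2⟩ := ih (toggleStep s a) (nodup_toggleStep s a hnd)
    refine ⟨h1, fun x => ?_⟩
    rw [List.foldl_cons, h2 x, mem_toggleStep]
    by_cases hxa : x = a
    · subst hxa
      rw [List.count_cons_self]
      simp only [ne_eq, not_true, and_false, false_or, true_and]
      constructor <;> intro h <;> by_cases hs : x ∈ s <;>
        simp only [hs, not_true, not_false_iff, true_iff, false_iff] at h ⊢ <;>
        omega
    · rw [show (a :: t).count x = t.count x from by
        simp [(Ne.symm hxa : a ≠ x)]]
      simp only [hxa, ne_eq, not_false_iff, and_true, false_and, or_false]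

-- the toggled set starting from ∅ is empty iff every value occurs an even number of times
lemma toggle_empty_iff (vs : List String) :
    (vs.foldl toggleStep PySem.Set.empty = []) ↔ ∀ x ∈ vs, vs.count x % 2 = 0 := by
  obtain ⟨_, hmem⟩ := toggle_inv vs PySem.Set.empty (by simp [PySem.Set.empty])
  rw [List.eq_nil_iff_forall_not_mem]
  constructor
  · intro h x hx
    have := h x
    rw [hmem x] at this
    simpa [PySem.Set.empty] using this
  · intro h x
    rw [hmem x]
    by_cases hx : x ∈ vs
    · simp [PySem.Set.empty, h x hx]
    · simp [PySem.Set.empty, List.count_eq_zero_of_not_mem hx]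

-- B's check, characterized: all counter values even iff every element's count is even
lemma alt_char (vs : List String) :
    ((PySem.Dict.counter vs).values.all (fun c => c % 2 == 0)) = true ↔
    ∀ x ∈ vs, vs.count x % 2 = 0 := by
  have hv : (PySem.Dict.counter vs).values
      = (PySem.Set.ofList vs).map (fun k => ((vs.count k : Int))) := by
    show (PySem.Dict.counter vs).items.map (·.2) = _
    rw [PySem.Dict.items_counter]
    simp
  rw [hv]
  simp only [List.all_map, List.all_eq_true, Function.comp]
  constructor
  · intro h x hx
    have := h x ((PySem.Set.mem_ofList vs x).mpr hx)
    simp only [beq_iff_eq] at this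
    omega
  · intro h x hx
    have := h x ((PySem.Set.mem_ofList vs x).mp hx)
    simp only [beq_iff_eq]
    omega

-- an odd-length list has some element with an odd count
lemma odd_length_exists_odd_count (vs : List String) (h : vs.length % 2 = 1) :
    ∃ x ∈ vs, vs.count x % 2 = 1 := by
  by_contra hc
  push Not at hc
  have hall : ∀ x ∈ vs.dedup, vs.count x % 2 = 0 := by
    intro x hx
    have := hc x (List.mem_dedup.mp hx)
    omega
  have hsum : ∀ (ds : List String), (∀ x ∈ ds, vs.count x % 2 = 0) →
      ((ds.map (fun x => vs.count x)).sum) % 2 = 0 := by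
    intro ds
    induction ds with
    | nil => intro _; simp
    | cons a t ih =>
      intro hds
      simp only [List.map_cons, List.sum_cons]
      have h1 := hds a (by simp)
      have h2 := ih (fun x hx => hds x (List.mem_cons_of_mem a hx))
      omega
  have := hsum vs.dedup hall
  rw [List.sum_map_count_dedup_eq_length] at this
  omega

-- main: A = B as a function of the values list
lemma key_lemma (vs : List String) :
    (if vs.length == 0 then true
     else if vs.length % 2 != 0 then false
     else (PySem.Set.len (vs.foldl toggleStep PySem.Set.empty) == 0))
    = (PySem.Dict.counter vs).values.all (fun c => c % 2 == 0) := by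
  by_cases h0 : vs = []
  · subst h0; rfl
  · rw [if_neg (by simpa [List.length_eq_zero_iff] using h0)]
    by_cases hodd : vs.length % 2 = 1
    · rw [if_pos (by simp [hodd])]
      obtain ⟨x, hx, hcx⟩ := odd_length_exists_odd_count vs hodd
      symm
      rw [Bool.eq_false_iff]
      intro hall
      have := (alt_char vs).mp hall x hx
      omega
    · rw [if_neg (by simp; omega)]
      have hiff : (PySem.Set.len (vs.foldl toggleStep PySem.Set.empty) == 0) = true ↔
          vs.foldl toggleStep PySem.Set.empty = [] := by
        simp [PySem.Set.len, List.length_eq_zero_iff]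
      rcases hb : (PySem.Dict.counter vs).values.all (fun c => c % 2 == 0) with _ | _
      · rw [Bool.eq_false_iff]
        intro ha
        have he := hiff.mp ha
        have h1 := (toggle_empty_iff vs).mp he
        have h2 := (alt_char vs).mpr h1
        simp [hb] at h2
      · rw [hiff.mpr ((toggle_empty_iff vs).mpr ((alt_char vs).mp hb))]

-- ===== VERDICT (by name: the statement is the Claim_ definition above) =====
theorem canMatchFellows_spec : Claim_equal_canMatchFellows := by
  intro skillMap _
  unfold Spec_canMatchFellows canMatchFellows canMatchFellows_alt
  have hsz : (PySem.Dict.ofList skillMap).size = (PySem.Dict.ofList skillMap).values.length := by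
    simp [PySem.Dict.size, PySem.Dict.values]
  simp only [hsz]
  exact key_lemma (PySem.Dict.ofList skillMap).values
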